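-- pv_equiv track=rewrite | github.com/junstat/JavaLearning | NowCoder/src/huawei/csdn_blog/34_IPv4地址转换成整数/main.py | solve
-- ===== SOURCE A (Python) =====
-- def int2bin(n):
--     s = bin(n).replace("0b", "")
--     return f'{"0" * (8 - len(s))}{s}'
--
-- def solve(s):
--     nums = s.split('#')
--     n = len(nums)
--     if n != 4:
--         return "invalid IP"
--     for idx, x in enumerate(nums):
--         if not x.isdigit():
--             return "invalid IP"
--         ix = int(x)
--         if idx == 0 and (ix < 1 or ix > 128):
--             return "invalid IP"
--         elif idx != 0 and (ix < 0 or ix > 255):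
--             return "invalid IP"
--     bin_x = "".join([int2bin(int(x)) for x in nums])
--     return int(bin_x, 2)
-- ===== SOURCE B (Python) =====
-- def solve(s):
--     parts = s.split('#')
--     if len(parts) != 4:
--         return "invalid IP"
--     value = 0
--     for idx, x in enumerate(parts):
--         if not x.isdigit():
--             return "invalid IP"
--         ix = int(x)
--         lo, hi = (1, 128) if idx == 0 else (0, 255)
--         if ix < lo or ix > hi:
--             return "invalid IP"
--         value = value * 256 + ix
--     return value
-- ===== Notes on version B (the rewrite author's own statement) =====
-- stated objective: idiomatic
-- what changed: B drops the int2bin helper and the build-binary-strings/join/int(.,2) pipeline entirely, accumulating the result as value = value*256 + int(x) inside the single validation loop.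
import Mathlib
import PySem

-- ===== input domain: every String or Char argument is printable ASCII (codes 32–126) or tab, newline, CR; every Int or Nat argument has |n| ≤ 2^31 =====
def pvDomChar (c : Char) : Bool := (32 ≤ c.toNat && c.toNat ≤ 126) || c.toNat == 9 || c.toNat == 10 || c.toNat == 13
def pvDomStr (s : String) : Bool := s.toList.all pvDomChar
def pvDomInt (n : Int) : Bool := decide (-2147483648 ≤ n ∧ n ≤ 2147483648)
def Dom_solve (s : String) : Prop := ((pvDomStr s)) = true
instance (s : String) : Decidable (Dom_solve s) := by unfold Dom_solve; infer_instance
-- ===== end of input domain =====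

-- B replaces A's build-binary-strings/join/int(.,2) conversion by direct accumulation
-- value = value*256 + int(x) inside the one validation loop (same validation, no int2bin).

-- ===== PORT A =====
-- bin(n) for n > 0, without the '0b' prefix (most significant bit first)
def pvBinCore : Nat → List Char
  | 0 => []
  | n+1 => pvBinCore ((n+1)/2) ++ [if (n+1) % 2 = 1 then '1' else '0']

-- bin(n).replace("0b", "")
def pvBinStr (n : Int) : List Char :=
  if n < 0 then '-' :: (if (-n).toNat = 0 then ['0'] else pvBinCore (-n).toNat)
  else if n.toNat = 0 then ['0'] else pvBinCore n.toNat

-- int2bin(n) = f'{"0" * (8 - len(s))}{s}' with s = bin(n).replace("0b","")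
def int2bin (n : Int) : List Char :=
  let s := pvBinStr n
  List.replicate (8 - s.length) '0' ++ s

-- int(bin_x, 2), ported by hand as a base-2 left fold; exact on the non-empty '0'/'1'
-- strings this program feeds it (no sign, whitespace or underscores ever occur).
def pvParseBin (cs : List Char) : Int :=
  cs.foldl (fun a c => 2 * a + (if c = '1' then 1 else 0)) 0

-- the validation for-loop of A, with its early returns ('some msg' = early return)
def pvLoopA : List (Int × List Char) → Option String
  | [] => none
  | (idx, x) :: rest =>
    if ¬ PySem.Chars.strIsdigit x then some "invalid IP"
    else
      let ix := (PySem.Int.ofChars? x).getD 0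
      if idx = 0 ∧ (ix < 1 ∨ ix > 128) then some "invalid IP"
      else if idx ≠ 0 ∧ (ix < 0 ∨ ix > 255) then some "invalid IP"
      else pvLoopA rest

def solve (s : String) : String :=
  let nums := PySem.Chars.splitOn s.toList "#".toList
  let n := nums.length
  if n ≠ 4 then "invalid IP"
  else
    match pvLoopA (PySem.List.enumerate nums) with
    | some r => r
    | none =>
      let binx := (nums.map (fun x => int2bin ((PySem.Int.ofChars? x).getD 0))).flatten
      PySem.Int.toStr (pvParseBin binx)  -- Python returns the int; rendered as its str

-- ===== PORT B =====
-- B's loop: validate and accumulate value = value*256 + ix; none = "invalid IP"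
def pvLoopB : List (Int × List Char) → Int → Option Int
  | [], v => some v
  | (idx, x) :: rest, v =>
    if ¬ PySem.Chars.strIsdigit x then none
    else
      let ix := (PySem.Int.ofChars? x).getD 0
      let bounds : Int × Int := if idx = 0 then (1, 128) else (0, 255)
      if ix < bounds.1 ∨ ix > bounds.2 then none
      else pvLoopB rest (v * 256 + ix)

def solve_alt (s : String) : String :=
  let parts := PySem.Chars.splitOn s.toList "#".toList
  if parts.length ≠ 4 then "invalid IP"
  else
    match pvLoopB (PySem.List.enumerate parts) 0 with
    | none => "invalid IP"
    | some v => PySem.Int.toStr v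

-- ===== PRECONDITION & SPEC =====
def Spec_solve (s : String) (out : String) : Prop := out = solve_alt s
instance (s : String) (out : String) : Decidable (Spec_solve s out) := by unfold Spec_solve; infer_instance

-- ===== CLAIM (what is proved, stated in full; the proofs are below) =====
def Claim_equal_solve : Prop := ∀ (s : String), Dom_solve s → Spec_solve s (solve s)

-- ===== LEMMAS AND PROOFS =====

-- abbreviation for the base-2 fold with an accumulator
def pvPF (cs : List Char) (a : Int) : Int :=
  cs.foldl (fun a c => 2 * a + (if c = '1' then 1 else 0)) a

theorem pvPF_append (xs ys : List Char) (a : Int) : pvPF (xs ++ ys) a = pvPF ys (pvPF xs a) := by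
  simp [pvPF, List.foldl_append]

theorem pvPF_replicate (k : Nat) (a : Int) : pvPF (List.replicate k '0') a = a * 2 ^ k := by
  induction k generalizing a with
  | zero => simp [pvPF]
  | succ k ih =>
    rw [List.replicate_succ]
    show pvPF ('0' :: List.replicate k '0') a = _
    simp only [pvPF, List.foldl_cons] at *
    rw [if_neg (by decide)]
    rw [show 2 * a + 0 = 2 * a by ring, ih (2 * a)]
    ring

theorem pvPF_singleton (c : Char) (a : Int) :
    pvPF [c] a = 2 * a + (if c = '1' then 1 else 0) := by
  simp [pvPF]

theorem pvBinCore_spec (n : Nat) : ∀ a : Int, pvPF (pvBinCore n) a = a * 2 ^ (pvBinCore n).length + n := by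
  induction n using Nat.strong_induction_on with
  | _ n ih =>
    intro a
    match n with
    | 0 => simp [pvBinCore, pvPF]
    | m+1 =>
      rw [pvBinCore, pvPF_append, ih ((m+1)/2) (by omega) a, pvPF_singleton]
      rw [List.length_append, List.length_singleton, pow_succ]
      have hdiv : ((m+1)/2) * 2 + (m+1) % 2 = m+1 := by omega
      have hdiv' : ((((m+1)/2 : Nat)) : Int) * 2 + (((m+1) % 2 : Nat) : Int) = (m : Int) + 1 := by
        exact_mod_cast hdiv
      have h2 : (m+1) % 2 = 1 ∨ (m+1) % 2 = 0 := by omega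
      generalize (2:Int) ^ (pvBinCore ((m+1)/2)).length = P
      rcases h2 with h | h <;> rw [h] <;> rw [h] at hdiv' <;> push_cast <;>
        simp at hdiv' ⊢ <;> linarith

theorem pvBinCore_len (n k : Nat) (h : n < 2 ^ k) : (pvBinCore n).length ≤ k := by
  induction n using Nat.strong_induction_on generalizing k with
  | _ n ih =>
    match n with
    | 0 => simp [pvBinCore]
    | m+1 =>
      rw [pvBinCore]
      have hk : 1 ≤ k := by
        rcases Nat.eq_zero_or_pos k with rfl | hp
        · simp at h
        · exact hp
      have hlt : (m+1)/2 < 2 ^ (k-1) := by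
        have : 2 ^ k = 2 ^ (k-1) * 2 := by
          rw [← pow_succ]; congr 1; omega
        omega
      have := ih ((m+1)/2) (by omega) (k-1) hlt
      simp only [List.length_append, List.length_singleton]
      omega

theorem pvBinStr_spec (m : Int) (h0 : 0 ≤ m) (b : Int) :
    pvPF (pvBinStr m) b = b * 2 ^ (pvBinStr m).length + m := by
  have hnotneg : ¬ m < 0 := by omega
  have hm : ((m.toNat : Int)) = m := Int.toNat_of_nonneg h0
  by_cases hz : m.toNat = 0
  · simp [pvBinStr, hnotneg, hz, pvPF]
    omega
  · simp only [pvBinStr, if_neg hnotneg, if_neg hz]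
    rw [pvBinCore_spec m.toNat b, hm]

theorem pvBinStr_len (m : Int) (h0 : 0 ≤ m) (h255 : m ≤ 255) : (pvBinStr m).length ≤ 8 := by
  have hnotneg : ¬ m < 0 := by omega
  by_cases hz : m.toNat = 0
  · simp [pvBinStr, hnotneg, hz]
  · simp only [pvBinStr, if_neg hnotneg, if_neg hz]
    exact pvBinCore_len m.toNat 8 (by omega)

theorem pvInt2bin_spec (m : Int) (h0 : 0 ≤ m) (h255 : m ≤ 255) (a : Int) :
    pvPF (int2bin m) a = a * 256 + m := by
  rw [int2bin]
  rw [pvPF_append, pvPF_replicate, pvBinStr_spec m h0]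
  have hlen := pvBinStr_len m h0 h255
  rw [mul_assoc, ← pow_add]
  have h8 : 8 - (pvBinStr m).length + (pvBinStr m).length = 8 := by omega
  rw [h8]
  norm_num

theorem pvParseBin_eq (cs : List Char) : pvParseBin cs = pvPF cs 0 := rfl

-- ===== VERDICT (by name: the statement is the Claim_ definition above) =====
theorem solve_spec : Claim_equal_solve := by
  unfold Claim_equal_solve
  intro s _
  unfold Spec_solve solve solve_alt
  generalize PySem.Chars.splitOn s.toList "#".toList = l
  by_cases h4 : l.length = 4
  · rcases l with _ | ⟨a, _ | ⟨b, _ | ⟨c, _ | ⟨d, _ | ⟨e, t⟩⟩⟩⟩⟩ <;> simp at h4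
    norm_num
    set ia := (PySem.Int.ofChars? a).getD 0 with hia
    set ib := (PySem.Int.ofChars? b).getD 0 with hib
    set ic := (PySem.Int.ofChars? c).getD 0 with hic
    set id := (PySem.Int.ofChars? d).getD 0 with hid
    simp only [pvLoopA, pvLoopB]
    norm_num
    split_ifs with g1 g2 g3 g4 g5 g6 g7 g8 <;> try rfl
    -- all checks passed: the two conversions agree
    rw [pvParseBin_eq]
    rw [pvPF_append, pvPF_append, pvPF_append]
    rw [pvInt2bin_spec ia (by omega) (by omega), pvInt2bin_spec ib (by omega) (by omega),
        pvInt2bin_spec ic (by omega) (by omega), pvInt2bin_spec id (by omega) (by omega)]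
    ring_nf
    simp only [← hia, ← hib, ← hic, ← hid]
  · simp only [if_pos h4]
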